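-- pv_equiv track=rewrite | github.com/eyzzang90/headless | contentsInfo.py | get_content_url
-- ===== SOURCE A (Python) =====
-- def get_content_url(search_url_str, response_list):
--
-- 	content_url = None
--
-- 	for response in response_list:
-- 		resp = response['response']
--
-- 		url = resp['url']
-- 		idx = url.find(search_url_str)
-- 		if idx != -1:
-- 			content_url = url
--
-- 	return content_url
-- ===== SOURCE B (Python) =====
-- def get_content_url(search_url_str, response_list):
-- 	for response in reversed(response_list):
-- 		url = response['response']['url']
-- 		if search_url_str in url:
-- 			return url
-- 	return None
-- ===== Notes on version B (the rewrite author's own statement) =====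
-- stated objective: alternative
-- what changed: B scans the list in reverse and returns the first (i.e. last overall) matching URL immediately with an early return, instead of A's full forward pass that overwrites an accumulator; the membership test 'in' replaces find() != -1.
import Mathlib
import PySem

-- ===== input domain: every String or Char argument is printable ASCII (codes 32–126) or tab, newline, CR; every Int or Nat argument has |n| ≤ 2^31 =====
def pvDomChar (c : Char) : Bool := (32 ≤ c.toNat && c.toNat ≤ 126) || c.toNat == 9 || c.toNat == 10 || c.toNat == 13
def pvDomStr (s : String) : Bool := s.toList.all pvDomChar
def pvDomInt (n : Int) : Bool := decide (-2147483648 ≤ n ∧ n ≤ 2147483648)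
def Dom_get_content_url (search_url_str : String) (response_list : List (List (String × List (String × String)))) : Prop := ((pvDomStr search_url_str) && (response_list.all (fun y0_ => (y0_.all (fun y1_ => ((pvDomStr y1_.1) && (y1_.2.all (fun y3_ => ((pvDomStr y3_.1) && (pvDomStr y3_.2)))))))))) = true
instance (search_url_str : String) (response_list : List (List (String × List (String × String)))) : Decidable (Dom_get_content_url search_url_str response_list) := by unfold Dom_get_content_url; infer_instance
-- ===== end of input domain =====

-- B replaces A's full forward pass (accumulator overwritten at each match) by a reverse
-- scan with an early return at the first match; same last-match result, proved equal.

-- ===== PORT A =====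
-- forward fold, content_url accumulator updated whenever url.find(search) != -1
def get_content_url (search_url_str : String) (response_list : List (List (String × List (String × String)))) : Option String :=
  response_list.foldl
    (fun content_url response =>
      let resp := ((PySem.Dict.mk response).get? "response").getD []
      let url := ((PySem.Dict.mk resp).get? "url").getD ""
      let idx := PySem.Str.find url search_url_str
      if idx ≠ -1 then some url else content_url)
    none

-- ===== PORT B =====
-- reverse scan with early return
def pvRevFind (search_url_str : String) : List (List (String × List (String × String))) → Option String
  | [] => none
  | response :: rest =>
    let url := ((PySem.Dict.mk (((PySem.Dict.mk response).get? "response").getD [])).get? "url").getD ""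
    if PySem.Str.isIn search_url_str url then some url else pvRevFind search_url_str rest

def get_content_url_alt (search_url_str : String) (response_list : List (List (String × List (String × String)))) : Option String :=
  pvRevFind search_url_str response_list.reverse

-- ===== PRECONDITION & SPEC =====
-- Pre_ excludes exactly the inputs on which Python A raises KeyError: an entry without a
-- 'response' key or whose 'response' value lacks a 'url' key.
def Pre_get_content_url (search_url_str : String) (response_list : List (List (String × List (String × String)))) : Prop :=
  response_list.all (fun response =>
    match (PySem.Dict.mk response).get? "response" with
    | none => false
    | some resp => ((PySem.Dict.mk resp).get? "url").isSome) = true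
instance (search_url_str : String) (response_list : List (List (String × List (String × String)))) : Decidable (Pre_get_content_url search_url_str response_list) := by unfold Pre_get_content_url; infer_instance

def pvWitness_get_content_url : String × (List (List (String × List (String × String)))) :=
  ("ab", [[("response", [("url", "xabx")])], [("response", [("url", "zz")])]])

def Spec_get_content_url (search_url_str : String) (response_list : List (List (String × List (String × String)))) (out : Option String) : Prop := out = get_content_url_alt search_url_str response_list
instance (search_url_str : String) (response_list : List (List (String × List (String × String)))) (out : Option String) : Decidable (Spec_get_content_url search_url_str response_list out) := by unfold Spec_get_content_url; infer_instance

-- ===== CLAIM (what is proved, stated in full; the proofs are below) =====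
def Claim_equal_get_content_url : Prop := ∀ (search_url_str : String) (response_list : List (List (String × List (String × String)))), Dom_get_content_url search_url_str response_list → Pre_get_content_url search_url_str response_list → Spec_get_content_url search_url_str response_list (get_content_url search_url_str response_list)

-- ===== LEMMAS AND PROOFS =====

-- A's fold over l, from any accumulator, equals B's reverse scan of l (falling back to the
-- accumulator when nothing matches).  Reverse induction on l.
theorem pv_fold_eq_rev (s : String) (l : List (List (String × List (String × String))))
    (acc : Option String) :
    l.foldl
      (fun content_url response =>
        let resp : List (String × String) := ((PySem.Dict.mk response).get? "response").getD []
        let url := ((PySem.Dict.mk resp).get? "url").getD ""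
        let idx := PySem.Str.find url s
        if idx ≠ -1 then some url else content_url)
      acc
    = (pvRevFind s l.reverse).elim acc some := by
  induction l using List.reverseRecOn generalizing acc with
  | nil => simp [pvRevFind]
  | append_singleton l r ih =>
    rw [List.foldl_append, List.reverse_append]
    simp only [List.foldl_cons, List.foldl_nil, List.reverse_singleton, List.singleton_append,
      pvRevFind]
    set url := ((PySem.Dict.mk (((PySem.Dict.mk r).get? "response").getD [])).get? "url").getD "" with hurl
    by_cases h : s.toList <:+: url.toList
    · rw [if_pos ((PySem.Str.find_ne_neg_one_iff url s).mpr h),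
        if_pos ((PySem.Str.isIn_iff_infix s url).mpr h)]
      rfl
    · rw [if_neg (by simpa using (PySem.Str.find_eq_neg_one_iff url s).mpr h),
        if_neg (by simp [PySem.Chars.isIn_eq_false_iff, h]), ih]

-- ===== VERDICT (by name: the statement is the Claim_ definition above) =====
theorem get_content_url_spec : Claim_equal_get_content_url := by
  intro s rl _ _
  unfold Spec_get_content_url get_content_url get_content_url_alt
  rw [pv_fold_eq_rev]
  cases pvRevFind s rl.reverse <;> rfl
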